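-- pv_equiv track=rewrite | github.com/Wysie/zeekr_key_extractor | zeekr_extract_secrets.py | _split_into_tables
-- ===== SOURCE A (Python) =====
-- def _split_into_tables(entries, max_gap=8):
--     """Split a list of (offset, value) entries into sub-tables by gap size."""
--     if not entries:
--         return []
--     tables = []
--     current = [entries[0]]
--     for i in range(1, len(entries)):
--         gap = entries[i][0] - entries[i - 1][0]
--         if gap > max_gap:
--             tables.append(current)
--             current = [entries[i]]
--         else:
--             current.append(entries[i])
--     tables.append(current)
--     return tables
-- ===== SOURCE B (Python) =====
-- def _split_into_tables(entries, max_gap=8):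
--     """Split a list of (offset, value) entries into sub-tables by gap size,
--     built back-to-front in one reversed pass."""
--     tables = []
--     for e in reversed(entries):
--         if tables and tables[0][0][0] - e[0] <= max_gap:
--             tables[0] = [e] + tables[0]
--         else:
--             tables = [[e]] + tables
--     return tables
-- ===== Notes on version B (the rewrite author's own statement) =====
-- stated objective: alternative
-- what changed: B builds the table list back-to-front: one reversed pass that either prepends the entry to the current first group or starts a new group, replacing A's forward index loop with a (tables, current) accumulator and final flush.
import Mathlib
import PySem

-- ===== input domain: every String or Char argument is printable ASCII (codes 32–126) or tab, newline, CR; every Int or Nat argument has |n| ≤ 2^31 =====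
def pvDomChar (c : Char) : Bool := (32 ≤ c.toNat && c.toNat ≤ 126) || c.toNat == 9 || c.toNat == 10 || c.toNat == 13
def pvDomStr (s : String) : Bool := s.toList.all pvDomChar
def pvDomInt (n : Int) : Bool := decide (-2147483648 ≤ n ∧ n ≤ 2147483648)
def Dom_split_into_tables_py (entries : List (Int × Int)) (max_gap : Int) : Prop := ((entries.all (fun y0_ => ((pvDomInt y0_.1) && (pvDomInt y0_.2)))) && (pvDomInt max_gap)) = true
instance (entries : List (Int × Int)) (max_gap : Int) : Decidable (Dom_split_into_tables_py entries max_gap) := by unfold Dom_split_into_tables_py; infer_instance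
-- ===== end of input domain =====

-- B builds the table list back-to-front in one reversed pass (prepend to first group or start a new
-- group), instead of A's forward index loop with a (tables, current) accumulator; proved equal on all inputs.


-- ===== PORT A =====
-- loop body of A's 'for i in range(1, len(entries))': state is (tables, current)
def stepA (entries : List (Int × Int)) (max_gap : Int)
    (st : List (List (Int × Int)) × List (Int × Int)) (i : Int) :
    List (List (Int × Int)) × List (Int × Int) :=
  let gap := (PySem.List.pyGetD entries i ((0:Int),(0:Int))).1
             - (PySem.List.pyGetD entries (i - 1) ((0:Int),(0:Int))).1
  if gap > max_gap then (st.1 ++ [st.2], [PySem.List.pyGetD entries i ((0:Int),(0:Int))])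
  else (st.1, st.2 ++ [PySem.List.pyGetD entries i ((0:Int),(0:Int))])

def split_into_tables_py (entries : List (Int × Int)) (max_gap : Int) : List (List (Int × Int)) :=
  match entries with
  | [] => []
  | e0 :: _ =>
    let st := (PySem.List.pyRange 1 (entries.length : Int) 1).foldl (stepA entries max_gap) ([], [e0])
    st.1 ++ [st.2]

-- ===== PORT B =====
-- loop body of B's 'for e in reversed(entries)': tables[0][0][0] is pyGetD of the first group at 0
def stepB (max_gap : Int) (e : Int × Int) (tables : List (List (Int × Int))) :
    List (List (Int × Int)) :=
  match tables with
  | [] => [[e]]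
  | t :: ts => if (PySem.List.pyGetD t 0 ((0:Int),(0:Int))).1 - e.1 ≤ max_gap
               then ([e] ++ t) :: ts
               else [[e]] ++ (t :: ts)

def split_into_tables_py_alt (entries : List (Int × Int)) (max_gap : Int) : List (List (Int × Int)) :=
  entries.foldr (stepB max_gap) []

-- ===== PRECONDITION & SPEC =====
def Spec_split_into_tables_py (entries : List (Int × Int)) (max_gap : Int) (out : List (List (Int × Int))) : Prop := out = split_into_tables_py_alt entries max_gap
instance (entries : List (Int × Int)) (max_gap : Int) (out : List (List (Int × Int))) : Decidable (Spec_split_into_tables_py entries max_gap out) := by unfold Spec_split_into_tables_py; infer_instance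

-- ===== CLAIM (what is proved, stated in full; the proofs are below) =====
def Claim_equal_split_into_tables_py : Prop := ∀ (entries : List (Int × Int)) (max_gap : Int), Dom_split_into_tables_py entries max_gap → Spec_split_into_tables_py entries max_gap (split_into_tables_py entries max_gap)

-- ===== LEMMAS AND PROOFS =====

-- Structural-recursion rendering of A's loop: p is the previous entry, l the remaining entries.
def loopA (g : Int) : (Int × Int) → List (Int × Int) → List (List (Int × Int)) → List (Int × Int) → List (List (Int × Int))
  | _, [], T, C => T ++ [C]
  | p, q :: l, T, C =>
      if q.1 - p.1 > g then loopA g q l (T ++ [C]) [q] else loopA g q l T (C ++ [q])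

-- A's indexed fold over range(1, len) equals loopA.
lemma bridgeA (entries : List (Int × Int)) (g : Int) :
    ∀ (l : List (Int × Int)) (k : Nat) (p : Int × Int) (T : List (List (Int × Int))) (C : List (Int × Int)),
    entries.drop k = p :: l →
    (((PySem.List.pyRange ((k : Int) + 1) (entries.length : Int) 1).foldl (stepA entries g) (T, C)).1
      ++ [((PySem.List.pyRange ((k : Int) + 1) (entries.length : Int) 1).foldl (stepA entries g) (T, C)).2])
      = loopA g p l T C := by
  intro l
  induction l with
  | nil =>
    intro k p T C h
    have hlen : entries.length = k + 1 := by
      have := congrArg List.length h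
      simp [List.length_drop] at this
      omega
    rw [PySem.List.pyRange_one_eq_nil (by simp [hlen])]
    simp [loopA]
  | cons q l ih =>
    intro k p T C h
    have hk : entries[k]? = some p := by
      have := congrArg (fun xs => xs[0]?) h
      simpa using this
    have hk1 : entries[k+1]? = some q := by
      have := congrArg (fun xs => xs[1]?) h
      simpa using this
    have hlt : ((k : Int) + 1) < (entries.length : Int) := by
      have := congrArg List.length h
      simp [List.length_drop] at this
      omega
    rw [PySem.List.pyRange_one_cons hlt]
    have hstep : stepA entries g (T, C) ((k : Int) + 1) =
        if q.1 - p.1 > g then (T ++ [C], [q]) else (T, C ++ [q]) := by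
      have e1 : PySem.List.pyGetD entries ((k : Int) + 1) ((0:Int),(0:Int)) = q := by
        have : ((k : Int) + 1) = ((k + 1 : Nat) : Int) := by push_cast; ring
        rw [this, PySem.List.pyGetD_natCast]
        simp [List.getD, hk1]
      have e0 : PySem.List.pyGetD entries ((k : Int) + 1 - 1) ((0:Int),(0:Int)) = p := by
        have : ((k : Int) + 1 - 1) = ((k : Nat) : Int) := by ring
        rw [this, PySem.List.pyGetD_natCast]
        simp [List.getD, hk]
      simp only [stepA, e1, e0]
    have hdrop : entries.drop (k + 1) = q :: l := by
      have : entries.drop (k + 1) = (entries.drop k).drop 1 := by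
        rw [← List.drop_drop]
      rw [this, h]
      simp
    have hcast : ((k : Int) + 1) + 1 = ((k + 1 : Nat) : Int) + 1 := by push_cast; ring
    rw [List.foldl_cons, hstep]
    by_cases hg : q.1 - p.1 > g
    · simp only [if_pos hg]
      rw [hcast, ih (k + 1) q (T ++ [C]) [q] hdrop]
      simp [loopA, hg]
    · simp only [if_neg hg]
      rw [hcast, ih (k + 1) q T (C ++ [q]) hdrop]
      simp [loopA, hg]

-- B's result on a nonempty list is a nonempty list whose first group starts with the head.
lemma headStructB (g : Int) :
    ∀ (l : List (Int × Int)) (e : Int × Int),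
    ∃ t gs, (e :: l).foldr (stepB g) [] = (e :: t) :: gs := by
  intro l
  induction l with
  | nil => intro e; exact ⟨[], [], rfl⟩
  | cons q l ih =>
    intro e
    obtain ⟨t', gs', h⟩ := ih q
    rw [List.foldr_cons, h]
    by_cases hg : q.1 - e.1 ≤ g
    · exact ⟨q :: t', gs', by simp [stepB, PySem.List.pyGetD_zero_cons, hg]⟩
    · exact ⟨[], (q :: t') :: gs', by simp [stepB, PySem.List.pyGetD_zero_cons, hg]⟩

-- Invariant linking A's accumulator to B's back-to-front result.
lemma loopA_eq_stepB (g : Int) :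
    ∀ (l : List (Int × Int)) (p : Int × Int) (T : List (List (Int × Int))) (C : List (Int × Int))
      (t : List (Int × Int)) (gs : List (List (Int × Int))),
    (p :: l).foldr (stepB g) [] = (p :: t) :: gs →
    loopA g p l T C = T ++ (C ++ t) :: gs := by
  intro l
  induction l with
  | nil =>
    intro p T C t gs h
    have h' : ([[p]] : List (List (Int × Int))) = (p :: t) :: gs := h
    have ht : t = [] ∧ gs = [] := by
      constructor <;> [skip; skip] <;> injection h' with h1 h2 <;> first
        | (injection h1 with _ h3; exact h3.symm)
        | exact h2.symm
    obtain ⟨ht, hgs⟩ := ht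
    simp [loopA, ht, hgs]
  | cons q l ih =>
    intro p T C t gs h
    obtain ⟨t', gs', hB⟩ := headStructB g l q
    rw [List.foldr_cons, hB] at h
    by_cases hg : q.1 - p.1 ≤ g
    · have h' : ((p :: q :: t') :: gs' : List (List (Int × Int))) = (p :: t) :: gs := by
        simpa [stepB, PySem.List.pyGetD_zero_cons, hg] using h
      have ht : t = q :: t' := by injection h' with h1 _; injection h1 with _ h3; exact h3.symm
      have hgs : gs = gs' := by injection h' with _ h2; exact h2.symm
      have hng : ¬ q.1 - p.1 > g := by omega
      simp only [loopA, if_neg hng]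
      rw [ih q T (C ++ [q]) t' gs' hB, ht, hgs]
      simp
    · have h' : (([p] :: (q :: t') :: gs' : List (List (Int × Int)))) = (p :: t) :: gs := by
        simpa [stepB, PySem.List.pyGetD_zero_cons, hg] using h
      have ht : t = [] := by injection h' with h1 _; injection h1 with _ h3; exact h3.symm
      have hgs : gs = (q :: t') :: gs' := by injection h' with _ h2; exact h2.symm
      have hgg : q.1 - p.1 > g := by omega
      simp only [loopA, if_pos hgg]
      rw [ih q (T ++ [C]) [q] t' gs' hB, ht, hgs]
      simp

-- ===== VERDICT (by name: the statement is the Claim_ definition above) =====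
theorem split_into_tables_py_spec : Claim_equal_split_into_tables_py := by
  intro entries max_gap _
  unfold Spec_split_into_tables_py
  cases entries with
  | nil => rfl
  | cons e0 rest =>
    have hA : split_into_tables_py (e0 :: rest) max_gap = loopA max_gap e0 rest [] [e0] := by
      have := bridgeA (e0 :: rest) max_gap rest 0 e0 [] [e0] (by simp)
      simpa [split_into_tables_py] using this
    obtain ⟨t, gs, hB⟩ := headStructB max_gap rest e0
    rw [hA, loopA_eq_stepB max_gap rest e0 [] [e0] t gs hB]
    simp [split_into_tables_py_alt, hB]
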